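-- pv_equiv track=rewrite | github.com/ethanmlam/ieor180backend | app.py | sort_course_numbers
-- ===== SOURCE A (Python) =====
-- def sort_course_numbers(course_list):
--     # Separate numeric and alphanumeric courses
--     numeric_courses = []
--     alphanumeric_courses = []
--
--     for course in course_list:
--         # Convert any numeric types to string first
--         course_str = str(course)
--
--         # Check if the course number is purely numeric
--         if course_str.isdigit():
--             numeric_courses.append(course_str)
--         else:
--             alphanumeric_courses.append(course_str)
--
--     # Sort each group separately
--     numeric_courses.sort(key=int)  # Sort numeric courses as integers
--     alphanumeric_courses.sort()    # Sort alphanumeric courses regularly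
--
--     # Return numeric courses first, then alphanumeric
--     return numeric_courses + alphanumeric_courses
-- ===== SOURCE B (Python) =====
-- def sort_course_numbers(course_list):
--     # One keyed stable sort: numerics (by integer value) before alphanumerics (lexicographic).
--     def key(s):
--         return (0, int(s), '') if s.isdigit() else (1, 0, s)
--     return sorted((str(c) for c in course_list), key=key)
-- ===== Notes on version B (the rewrite author's own statement) =====
-- stated objective: simpler
-- what changed: Replaced the partition-into-two-lists-plus-two-separate-sorts-plus-concatenation with a single stable sorted() call using the tuple key (0, int(s), '') for digit strings and (1, 0, s) for the rest, so numerics sort by value before alphanumerics in one pass.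
import Mathlib
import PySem

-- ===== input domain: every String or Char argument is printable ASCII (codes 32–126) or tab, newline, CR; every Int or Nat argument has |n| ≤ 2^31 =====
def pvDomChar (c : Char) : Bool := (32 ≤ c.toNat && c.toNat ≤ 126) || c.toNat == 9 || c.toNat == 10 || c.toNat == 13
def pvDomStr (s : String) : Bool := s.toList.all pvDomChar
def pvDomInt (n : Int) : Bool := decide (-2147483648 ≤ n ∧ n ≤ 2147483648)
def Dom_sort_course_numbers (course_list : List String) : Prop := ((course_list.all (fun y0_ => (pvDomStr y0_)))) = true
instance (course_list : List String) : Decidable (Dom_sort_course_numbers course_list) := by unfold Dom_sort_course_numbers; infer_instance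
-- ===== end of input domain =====

-- B replaces A's partition-plus-two-sorts with a single stable keyed sort; objective: simpler.

-- ===== PORT A =====
-- key=int on a digit-only string: int(s) always parses there, so `.getD 0` is never taken
def pvKeyInt (s : String) : Int := (PySem.Int.ofStr? s).getD 0

def sort_course_numbers (course_list : List String) : List String :=
  -- the partition loop (str(course) is the identity on strings)
  let p := course_list.foldl
    (fun (p : List String × List String) course =>
      if PySem.Str.strIsdigit course then (p.1 ++ [course], p.2) else (p.1, p.2 ++ [course]))
    ([], [])
  -- numeric_courses.sort(key=int); alphanumeric_courses.sort()
  PySem.List.sorted p.1 pvKeyInt false ++ PySem.List.sorted p.2 (fun s => s) false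

-- ===== PORT B =====
-- the key function of Source B: (0, int(s), '') if s.isdigit() else (1, 0, s)
def pvKeyB (s : String) : Int × Int × String :=
  if PySem.Str.strIsdigit s then (0, pvKeyInt s, "") else (1, 0, s)

-- Python's lexicographic '<' on the 3-tuples pvKeyB produces (int,int,str): exact hand port
def pvLexLt (p q : Int × Int × String) : Bool :=
  decide (p.1 < q.1 ∨ (p.1 = q.1 ∧ (p.2.1 < q.2.1 ∨ (p.2.1 = q.2.1 ∧ p.2.2 < q.2.2))))

-- sorted(xs, key=pvKeyB): stable insertion sort, PySem's model of Python's sorted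
def sort_course_numbers_alt (course_list : List String) : List String :=
  course_list.foldl
    (fun acc s => PySem.List.insertBy (fun a b => pvLexLt (pvKeyB a) (pvKeyB b)) s acc) []

-- ===== PRECONDITION & SPEC =====
def Spec_sort_course_numbers (course_list : List String) (out : List String) : Prop := out = sort_course_numbers_alt course_list
instance (course_list : List String) (out : List String) : Decidable (Spec_sort_course_numbers course_list out) := by unfold Spec_sort_course_numbers; infer_instance

-- ===== CLAIM (what is proved, stated in full; the proofs are below) =====
def Claim_equal_sort_course_numbers : Prop := ∀ (course_list : List String), Dom_sort_course_numbers course_list → Spec_sort_course_numbers course_list (sort_course_numbers course_list)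

-- ===== LEMMAS AND PROOFS =====

-- B's comparison on two digit strings is A's numeric comparison
lemma lex_digit_digit (a b : String) (ha : PySem.Chars.strIsdigit a.toList = true)
    (hb : PySem.Chars.strIsdigit b.toList = true) :
    pvLexLt (pvKeyB a) (pvKeyB b) = decide (pvKeyInt a < pvKeyInt b) := by
  by_cases h : pvKeyInt a < pvKeyInt b <;>
    simp [pvKeyB, pvLexLt, ha, hb, h]

lemma lex_digit_alpha (a b : String) (ha : PySem.Chars.strIsdigit a.toList = true)
    (hb : PySem.Chars.strIsdigit b.toList = false) :
    pvLexLt (pvKeyB a) (pvKeyB b) = true := by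
  simp [pvKeyB, pvLexLt, ha, hb]

lemma lex_alpha_digit (a b : String) (ha : PySem.Chars.strIsdigit a.toList = false)
    (hb : PySem.Chars.strIsdigit b.toList = true) :
    pvLexLt (pvKeyB a) (pvKeyB b) = false := by
  simp [pvKeyB, pvLexLt, ha, hb]

lemma lex_alpha_alpha (a b : String) (ha : PySem.Chars.strIsdigit a.toList = false)
    (hb : PySem.Chars.strIsdigit b.toList = false) :
    pvLexLt (pvKeyB a) (pvKeyB b) = decide (a < b) := by
  by_cases h : a < b <;>
    simp [pvKeyB, pvLexLt, ha, hb, h]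

-- inserting a digit string into (digits ++ alphas) stays in the digit block,
-- positioned exactly as A's numeric insertion positions it
lemma insert_digit (x : String) (N A : List String)
    (hx : PySem.Chars.strIsdigit x.toList = true)
    (hN : ∀ n ∈ N, PySem.Chars.strIsdigit n.toList = true)
    (hA : ∀ a ∈ A, PySem.Chars.strIsdigit a.toList = false) :
    PySem.List.insertBy (fun a b => pvLexLt (pvKeyB a) (pvKeyB b)) x (N ++ A)
      = PySem.List.insertBy (fun a b => decide (pvKeyInt a < pvKeyInt b)) x N ++ A := by
  induction N with
  | nil =>
    cases A with
    | nil => simp [PySem.List.insertBy]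
    | cons a A' =>
      simp [PySem.List.insertBy, lex_digit_alpha x a hx (hA a (by simp))]
  | cons n N' ih =>
    have hn := hN n (by simp)
    simp only [List.cons_append, PySem.List.insertBy, lex_digit_digit x n hx hn]
    by_cases h : pvKeyInt x < pvKeyInt n
    · simp [h]
    · simp [h, ih (fun m hm => hN m (by simp [hm]))]

-- inserting a non-digit string into (digits ++ alphas) skips the digit block
lemma insert_alpha (x : String) (N A : List String)
    (hx : PySem.Chars.strIsdigit x.toList = false)
    (hN : ∀ n ∈ N, PySem.Chars.strIsdigit n.toList = true)
    (hA : ∀ a ∈ A, PySem.Chars.strIsdigit a.toList = false) :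
    PySem.List.insertBy (fun a b => pvLexLt (pvKeyB a) (pvKeyB b)) x (N ++ A)
      = N ++ PySem.List.insertBy (fun a b => decide (a < b)) x A := by
  induction N with
  | nil =>
    induction A with
    | nil => simp [PySem.List.insertBy]
    | cons a A' ihA =>
      have ha := hA a (by simp)
      simp only [List.nil_append] at ihA ⊢
      simp only [PySem.List.insertBy, lex_alpha_alpha x a hx ha,
        ihA (fun m hm => hA m (by simp [hm]))]
  | cons n N' ih =>
    have hn := hN n (by simp)
    simp only [List.cons_append, PySem.List.insertBy, lex_alpha_digit x n hx hn]
    simp [ih (fun m hm => hN m (by simp [hm]))]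

-- the invariant: B's single insertion sort, started from a digit block N followed by a
-- non-digit block A, ends as (A's numeric sort loop over the digit elements started from N)
-- followed by (A's plain sort loop over the others started from A)
lemma foldl_split (xs : List String) : ∀ (N A : List String),
    (∀ n ∈ N, PySem.Chars.strIsdigit n.toList = true) →
    (∀ a ∈ A, PySem.Chars.strIsdigit a.toList = false) →
    xs.foldl (fun acc s => PySem.List.insertBy (fun a b => pvLexLt (pvKeyB a) (pvKeyB b)) s acc) (N ++ A)
      = (xs.filter (fun s => PySem.Chars.strIsdigit s.toList)).foldl
          (fun acc s => PySem.List.insertBy (fun a b => decide (pvKeyInt a < pvKeyInt b)) s acc) N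
        ++ (xs.filter (fun s => !PySem.Chars.strIsdigit s.toList)).foldl
          (fun acc s => PySem.List.insertBy (fun a b => decide (a < b)) s acc) A := by
  induction xs with
  | nil => intro N A _ _; simp
  | cons x xs ih =>
    intro N A hN hA
    by_cases hx : PySem.Chars.strIsdigit x.toList = true
    · simp only [List.foldl_cons, List.filter_cons, hx]
      rw [insert_digit x N A hx hN hA]
      simp only [Bool.not_true, Bool.false_eq_true, if_false]
      exact ih _ A (fun m hm => by
        rcases (PySem.List.mem_insertBy _ _ _ _).1 hm with h | h
        · exact h ▸ hx
        · exact hN m h) hA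
    · have hx' : PySem.Chars.strIsdigit x.toList = false := by simpa using hx
      simp only [List.foldl_cons, List.filter_cons, hx']
      rw [insert_alpha x N A hx' hN hA]
      simp only [Bool.not_false, Bool.false_eq_true, if_false]
      exact ih N _ hN (fun m hm => by
        rcases (PySem.List.mem_insertBy _ _ _ _).1 hm with h | h
        · exact h ▸ hx'
        · exact hA m h)

-- A's partition loop computes the two filters
lemma partition_eq (xs : List String) : ∀ (acc : List String × List String),
    xs.foldl (fun (p : List String × List String) course =>
        if PySem.Str.strIsdigit course then (p.1 ++ [course], p.2) else (p.1, p.2 ++ [course])) acc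
      = (acc.1 ++ xs.filter (fun s => PySem.Chars.strIsdigit s.toList),
         acc.2 ++ xs.filter (fun s => !PySem.Chars.strIsdigit s.toList)) := by
  induction xs with
  | nil => intro acc; simp
  | cons x xs ih =>
    intro acc
    rw [List.foldl_cons, ih]
    by_cases hx : PySem.Chars.strIsdigit x.toList = true <;> simp [hx]

theorem sort_course_numbers_spec : Claim_equal_sort_course_numbers := by
  intro xs _
  show sort_course_numbers xs = sort_course_numbers_alt xs
  unfold sort_course_numbers sort_course_numbers_alt
  rw [partition_eq xs ([], [])]
  simp only [List.nil_append]
  rw [PySem.List.sorted_eq_foldl_insertBy, PySem.List.sorted_eq_foldl_insertBy]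
  exact (foldl_split xs [] [] (by simp) (by simp)).symm
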